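-- pv_equiv track=rewrite | github.com/gabnou/house-bot | bot/weather.py | _best_sky
-- ===== SOURCE A (Python) =====
-- def _best_sky(items: list) -> tuple[str, str]:
--     """Pick the best sky condition for the day, preferring midday periods."""
--     for pref in ("12-18", "06-12", "00-24"):
--         for item in items:
--             if item.get("periodo") == pref and item.get("value"):
--                 return item["value"], item.get("descripcion", "")
--     for item in items:
--         if item.get("value"):
--             return item["value"], item.get("descripcion", "")
--     return "", ""
-- ===== SOURCE B (Python) =====
-- def _best_sky(items: list) -> tuple[str, str]:
--     """Pick the best sky condition for the day, preferring midday periods."""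
--     index = {}
--     fallback = None
--     for item in items:
--         val = item.get("value")
--         if not val:
--             continue
--         entry = (val, item.get("descripcion", ""))
--         if fallback is None:
--             fallback = entry
--         p = item.get("periodo")
--         if p is not None and p not in index:
--             index[p] = entry
--     for pref in ("12-18", "06-12", "00-24"):
--         if pref in index:
--             return index[pref]
--     return fallback if fallback is not None else ("", "")
-- ===== Notes on version B (the rewrite author's own statement) =====
-- stated objective: simpler
-- what changed: Replaces A's three full scans (one per preferred period) plus a fallback scan with a single pass that builds a periodo->(value,descripcion) index of first truthy items and a first-truthy fallback, then answers the preferences by constant-time dict lookups.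
import Mathlib
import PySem

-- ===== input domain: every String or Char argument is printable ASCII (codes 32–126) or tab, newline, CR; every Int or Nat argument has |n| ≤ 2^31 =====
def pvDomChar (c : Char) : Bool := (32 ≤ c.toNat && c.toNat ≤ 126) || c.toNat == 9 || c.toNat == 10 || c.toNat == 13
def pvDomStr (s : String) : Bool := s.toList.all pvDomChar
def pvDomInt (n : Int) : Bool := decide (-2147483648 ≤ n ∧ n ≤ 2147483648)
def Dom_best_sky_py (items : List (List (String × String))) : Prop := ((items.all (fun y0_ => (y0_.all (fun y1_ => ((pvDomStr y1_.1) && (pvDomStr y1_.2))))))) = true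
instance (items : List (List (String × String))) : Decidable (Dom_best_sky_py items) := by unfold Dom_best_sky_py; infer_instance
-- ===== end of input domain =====

-- B replaces A's four scans (one per preferred period, then a fallback scan) by a
-- single pass building a periodo → (value, descripcion) index plus a fallback,
-- answered by three dict lookups: objective 'simpler' (one traversal of the data).

-- ===== PORT A =====
-- item.get("value") truthiness test: some v with v ≠ "" (missing key and "" are falsy)
def pvTruthyVal (item : List (String × String)) : Option String :=
  match item.lookup "value" with
  | some v => if v = "" then none else some v
  | none => none

-- inner 'for item in items' of A's preference loop (item.get(k) = first-match lookup)
def best_sky_findPref (pref : String) : List (List (String × String)) → Option (String × String)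
  | [] => none
  | item :: rest =>
    if item.lookup "periodo" = some pref then
      match pvTruthyVal item with
      | some v => some (v, (item.lookup "descripcion").getD "")
      | none => best_sky_findPref pref rest
    else best_sky_findPref pref rest

-- A's final fallback scan
def best_sky_findAny : List (List (String × String)) → Option (String × String)
  | [] => none
  | item :: rest =>
    match pvTruthyVal item with
    | some v => some (v, (item.lookup "descripcion").getD "")
    | none => best_sky_findAny rest

def best_sky_py (items : List (List (String × String))) : String × String :=
  match best_sky_findPref "12-18" items with
  | some r => r
  | none =>
    match best_sky_findPref "06-12" items with
    | some r => r
    | none =>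
      match best_sky_findPref "00-24" items with
      | some r => r
      | none =>
        match best_sky_findAny items with
        | some r => r
        | none => ("", "")

-- ===== PORT B =====
-- one step of Source B's single loop: state = (index, fallback)
def best_sky_step (st : PySem.Dict String (String × String) × Option (String × String))
    (item : List (String × String)) :
    PySem.Dict String (String × String) × Option (String × String) :=
  match item.lookup "value" with
  | none => st
  | some val =>
    if val = "" then st
    else
      let entry := (val, (item.lookup "descripcion").getD "")
      let fb := match st.2 with
        | none => some entry
        | some e => some e
      let idx := match item.lookup "periodo" with
        | none => st.1
        | some p => if st.1.contains p then st.1 else st.1.insert p entry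
      (idx, fb)

-- Source B's final preference loop over the built state
def best_sky_pick (st : PySem.Dict String (String × String) × Option (String × String)) :
    String × String :=
  match st.1.get? "12-18" with
  | some e => e
  | none =>
    match st.1.get? "06-12" with
    | some e => e
    | none =>
      match st.1.get? "00-24" with
      | some e => e
      | none => st.2.getD ("", "")

def best_sky_py_alt (items : List (List (String × String))) : String × String :=
  best_sky_pick (items.foldl best_sky_step (PySem.Dict.empty, none))

-- ===== PRECONDITION & SPEC =====
def Spec_best_sky_py (items : List (List (String × String))) (out : String × String) : Prop := out = best_sky_py_alt items
instance (items : List (List (String × String))) (out : String × String) : Decidable (Spec_best_sky_py items out) := by unfold Spec_best_sky_py; infer_instance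

-- ===== CLAIM (what is proved, stated in full; the proofs are below) =====
def Claim_equal_best_sky_py : Prop := ∀ (items : List (List (String × String))), Dom_best_sky_py items → Spec_best_sky_py items (best_sky_py items)

-- ===== LEMMAS AND PROOFS =====

-- one step's effect on a single index key
theorem best_sky_step_get? (st : PySem.Dict String (String × String) × Option (String × String))
    (item : List (String × String)) (pref : String) :
    (best_sky_step st item).1.get? pref =
      match pvTruthyVal item with
      | none => st.1.get? pref
      | some v =>
        if item.lookup "periodo" = some pref then
          match st.1.get? pref with
          | some e => some e
          | none => some (v, (item.lookup "descripcion").getD "")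
        else st.1.get? pref := by
  unfold best_sky_step pvTruthyVal
  cases hv : item.lookup "value" with
  | none => simp
  | some val =>
    by_cases hve : val = ""
    · simp [hve]
    · simp only [if_neg hve]
      cases hp : item.lookup "periodo" with
      | none => simp
      | some p =>
        by_cases hc : st.1.contains p = true
        · have hs : (st.1.get? p).isSome := by
            rw [← PySem.Dict.contains_eq_isSome_get?]; exact hc
          by_cases hpe : p = pref
          · subst hpe
            cases h : st.1.get? p with
            | none => rw [h] at hs; simp at hs
            | some e => simp [hc, h]
          · have hne : ¬ (some p = some pref) := by simp [hpe]
            simp [hc, hne]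
        · have hcf : st.1.contains p = false := by simpa using hc
          have hdn : st.1.get? p = none := by
            have hh := PySem.Dict.contains_eq_isSome_get? st.1 p
            rw [hcf] at hh
            cases h : st.1.get? p
            · rfl
            · rw [h] at hh; simp at hh
          by_cases hpe : p = pref
          · subst hpe
            simp [hcf, PySem.Dict.get?_insert_self, hdn]
          · have hne : ¬ (some p = some pref) := by simp [hpe]
            simp [hcf, PySem.Dict.get?_insert, hne, Ne.symm hpe]

-- one step's effect on the fallback
theorem best_sky_step_snd (st : PySem.Dict String (String × String) × Option (String × String))
    (item : List (String × String)) :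
    (best_sky_step st item).2 =
      match pvTruthyVal item with
      | none => st.2
      | some v =>
        match st.2 with
        | some e => some e
        | none => some (v, (item.lookup "descripcion").getD "") := by
  unfold best_sky_step pvTruthyVal
  cases hv : item.lookup "value" with
  | none => simp
  | some val =>
    by_cases hve : val = ""
    · simp [hve]
    · simp only [if_neg hve]
      cases st.2 <;> simp

-- unfolding equations for A's scans (one cons step; definitional)
theorem best_sky_findPref_cons (pref : String) (item : List (String × String))
    (rest : List (List (String × String))) :
    best_sky_findPref pref (item :: rest) =
      if item.lookup "periodo" = some pref then
        match pvTruthyVal item with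
        | some v => some (v, (item.lookup "descripcion").getD "")
        | none => best_sky_findPref pref rest
      else best_sky_findPref pref rest := rfl

theorem best_sky_findAny_cons (item : List (String × String))
    (rest : List (List (String × String))) :
    best_sky_findAny (item :: rest) =
      match pvTruthyVal item with
      | some v => some (v, (item.lookup "descripcion").getD "")
      | none => best_sky_findAny rest := rfl

-- the index after the fold answers key pref: first st's entry, else the first matching truthy item
theorem best_sky_fold_get? (items : List (List (String × String)))
    (st : PySem.Dict String (String × String) × Option (String × String)) (pref : String) :
    (items.foldl best_sky_step st).1.get? pref =
      match st.1.get? pref with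
      | some e => some e
      | none => best_sky_findPref pref items := by
  induction items generalizing st with
  | nil => cases h : st.1.get? pref <;> simp [best_sky_findPref, h]
  | cons item rest ih =>
    rw [List.foldl_cons, ih, best_sky_step_get?, best_sky_findPref_cons]
    cases hv : pvTruthyVal item <;>
      cases h : st.1.get? pref <;>
        by_cases hp : item.lookup "periodo" = some pref <;>
          simp [hv, h, hp]

-- the fallback after the fold: first st's fallback, else the first truthy item
theorem best_sky_fold_snd (items : List (List (String × String)))
    (st : PySem.Dict String (String × String) × Option (String × String)) :
    (items.foldl best_sky_step st).2 =
      match st.2 with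
      | some e => some e
      | none => best_sky_findAny items := by
  induction items generalizing st with
  | nil => cases h : st.2 <;> simp [best_sky_findAny, h]
  | cons item rest ih =>
    rw [List.foldl_cons, ih, best_sky_step_snd, best_sky_findAny_cons]
    cases hv : pvTruthyVal item <;> cases h : st.2 <;> simp [hv, h]

-- ===== VERDICT (by name: the statement is the Claim_ definition above) =====
theorem best_sky_py_spec : Claim_equal_best_sky_py := by
  intro items _
  unfold Spec_best_sky_py best_sky_py best_sky_py_alt best_sky_pick
  rw [best_sky_fold_get? items _ "12-18",
      best_sky_fold_get? items _ "06-12",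
      best_sky_fold_get? items _ "00-24",
      best_sky_fold_snd items _]
  simp only [PySem.Dict.get?_empty]
  cases best_sky_findPref "12-18" items <;>
    cases best_sky_findPref "06-12" items <;>
      cases best_sky_findPref "00-24" items <;>
        cases best_sky_findAny items <;> rfl
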